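-- pv_equiv track=rewrite | github.com/JIWON27/CodingTest | 프로그래머스/unrated/181932. 코드 처리하기/코드 처리하기.py | solution
-- ===== SOURCE A (Python) =====
-- def solution(code):
--     ret = ''
--     mode = 0
--     for idx in range(len(code)):
--         if code[idx] == '1':
--             if mode == 0:
--                 mode = 1
--             else:
--                 mode = 0
--         else:
--             if mode == 0:
--                 if code[idx] != '1' and idx % 2 == 0:
--                     ret += code[idx]
--                 elif code[idx] == '1':
--                     mode = 1
--             elif mode == 1:
--                 if code[idx] != '1' and idx % 2 == 1:
--                     ret += code[idx]
--                 elif code[idx] == '1':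
--                     mode = 0
--     return "EMPTY" if len(ret) == 0 else ret
-- ===== SOURCE B (Python) =====
-- def solution(code):
--     # Split on '1': inside the k-th segment the mode is k % 2, so the kept
--     # characters are exactly an every-other slice of the segment whose phase
--     # is fixed by the segment's global start offset.
--     out = []
--     pos = 0  # global index where the current segment starts
--     for k, seg in enumerate(code.split('1')):
--         out.append(seg[(k + pos) % 2::2])
--         pos += len(seg) + 1
--     res = ''.join(out)
--     return res if res else 'EMPTY'
-- ===== Notes on version B (the rewrite author's own statement) =====
-- stated objective: faster
-- what changed: Replaces the per-character mode-toggling state machine by splitting the string on the toggle character and taking an every-other slice of each segment, with the slice phase computed from the segment index and its global offset.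
import Mathlib
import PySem

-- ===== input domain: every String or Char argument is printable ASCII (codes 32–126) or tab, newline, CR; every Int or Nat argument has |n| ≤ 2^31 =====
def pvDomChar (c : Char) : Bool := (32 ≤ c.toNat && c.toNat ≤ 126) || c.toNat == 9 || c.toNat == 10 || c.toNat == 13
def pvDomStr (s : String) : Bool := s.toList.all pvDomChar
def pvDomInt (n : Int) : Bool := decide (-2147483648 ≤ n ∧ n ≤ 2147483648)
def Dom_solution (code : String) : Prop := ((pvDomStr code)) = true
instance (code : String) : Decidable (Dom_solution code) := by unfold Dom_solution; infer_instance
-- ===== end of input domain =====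

-- B replaces A's per-character mode-toggling state machine by splitting the string
-- on '1' and taking an every-other slice of each segment, the slice phase computed
-- from the segment index and its global start offset.

-- ===== PORT A =====
-- one step of A's loop body (state = (ret, mode), element = (idx, code[idx]))
def pvStepA (st : List Char × Int) (p : Int × Char) : List Char × Int :=
  if p.2 = '1' then
    if st.2 = 0 then (st.1, 1) else (st.1, 0)
  else
    if st.2 = 0 then
      if p.2 ≠ '1' ∧ PySem.Int.mod p.1 2 = 0 then (st.1 ++ [p.2], st.2)
      else if p.2 = '1' then (st.1, 1) else (st.1, st.2)
    else if st.2 = 1 then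
      if p.2 ≠ '1' ∧ PySem.Int.mod p.1 2 = 1 then (st.1 ++ [p.2], st.2)
      else if p.2 = '1' then (st.1, 0) else (st.1, st.2)
    else (st.1, st.2)

def solution (code : String) : String :=
  let st := (PySem.List.enumerate code.toList 0).foldl pvStepA ([], 0)
  if st.1.length = 0 then "EMPTY" else String.ofList st.1

-- ===== PORT B =====
-- one step of B's loop (state = (out, pos), element = (k, seg));
-- seg[(k+pos)%2::2] ported via slice?; its step is the literal 2 ≠ 0, so slice? is never none
def pvStepB (st : List (List Char) × Int) (p : Int × List Char) : List (List Char) × Int :=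
  (st.1 ++ [(PySem.List.slice? p.2 (some (PySem.Int.mod (p.1 + st.2) 2)) none 2).getD []],
   st.2 + (p.2.length : Int) + 1)

def solution_alt (code : String) : String :=
  let parts := PySem.Chars.splitOn code.toList ['1']   -- code.split('1'); sep "1" ≠ ""
  let st := (PySem.List.enumerate parts 0).foldl pvStepB ([], 0)
  let res := PySem.Chars.join [] st.1                  -- ''.join(out)
  if res = [] then "EMPTY" else String.ofList res

-- ===== PRECONDITION & SPEC =====
def Spec_solution (code : String) (out : String) : Prop := out = solution_alt code
instance (code : String) (out : String) : Decidable (Spec_solution code out) := by unfold Spec_solution; infer_instance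

-- ===== CLAIM (what is proved, stated in full; the proofs are below) =====
def Claim_equal_solution : Prop := ∀ (code : String), Dom_solution code → Spec_solution code (solution code)

-- ===== LEMMAS AND PROOFS =====

-- common characterisation of A: chars kept from cs at global index i with mode m
def pvCore (cs : List Char) (i : Int) (m : Int) : List Char :=
  match cs with
  | [] => []
  | c :: rest =>
    if c = '1' then pvCore rest (i + 1) (1 - m)
    else if PySem.Int.mod i 2 = m then c :: pvCore rest (i + 1) m
    else pvCore rest (i + 1) m

-- structural model of code.split('1')
def pvSplit (cs : List Char) : List (List Char) :=
  match cs with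
  | [] => [[]]
  | c :: rest => if c = '1' then [] :: pvSplit rest else (pvSplit rest).modifyHead (c :: ·)

-- every-other selection (what xs[s::2] computes after dropping s ∈ {0,1})
def pvEvOdd {α : Type} (xs : List α) : List α :=
  match xs with
  | [] => []
  | [a] => [a]
  | a :: _ :: rest => a :: pvEvOdd rest

-- segment-wise output of B, as a structural recursion
def pvSegs (segs : List (List Char)) (k : Int) (pos : Int) : List Char :=
  match segs with
  | [] => []
  | seg :: rest =>
      pvEvOdd (seg.drop (PySem.Int.mod (k + pos) 2).toNat) ++
        pvSegs rest (k + 1) (pos + (seg.length : Int) + 1)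

lemma pymod2 (a : Int) : PySem.Int.mod a 2 = a % 2 := by
  simp [PySem.Int.mod, Int.fmod_eq_emod]

lemma pvEvOdd_cons {α : Type} (c : α) (h : List α) :
    pvEvOdd (c :: h) = c :: pvEvOdd (h.drop 1) := by
  cases h <;> simp [pvEvOdd]

lemma a_fold (cs : List Char) : ∀ (i : Int) (ret : List Char) (m : Int), (m = 0 ∨ m = 1) →
    ((PySem.List.enumerate cs i).foldl pvStepA (ret, m)).1 = ret ++ pvCore cs i m := by
  induction cs with
  | nil => intro i ret m _; simp [PySem.List.enumerate_nil, pvCore]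
  | cons c rest ih =>
    intro i ret m hm
    rw [PySem.List.enumerate_cons, List.foldl_cons]
    by_cases hc : c = '1'
    · subst hc
      rcases hm with hm | hm <;> subst hm
      · rw [show pvStepA (ret, 0) (i, '1') = (ret, 1) by simp [pvStepA]]
        rw [ih (i + 1) ret 1 (Or.inr rfl)]
        simp [pvCore]
      · rw [show pvStepA (ret, 1) (i, '1') = (ret, 0) by simp [pvStepA]]
        rw [ih (i + 1) ret 0 (Or.inl rfl)]
        simp [pvCore]
    · rcases hm with hm | hm <;> subst hm
      · by_cases hp : i % 2 = 0
        · rw [show pvStepA (ret, 0) (i, c) = (ret ++ [c], 0) by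
                simp [pvStepA, hc, PySem.Int.mod, Int.fmod_eq_emod, hp]]
          rw [ih (i + 1) (ret ++ [c]) 0 (Or.inl rfl)]
          simp [pvCore, hc, PySem.Int.mod, Int.fmod_eq_emod, hp]
        · have hd : i % 2 = 1 := by omega
          rw [show pvStepA (ret, 0) (i, c) = (ret, 0) by
                simp [pvStepA, hc, PySem.Int.mod, Int.fmod_eq_emod, hd]]
          rw [ih (i + 1) ret 0 (Or.inl rfl)]
          simp [pvCore, hc, PySem.Int.mod, Int.fmod_eq_emod, hd]
      · by_cases hp : i % 2 = 1
        · rw [show pvStepA (ret, 1) (i, c) = (ret ++ [c], 1) by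
                simp [pvStepA, hc, PySem.Int.mod, Int.fmod_eq_emod, hp]]
          rw [ih (i + 1) (ret ++ [c]) 1 (Or.inr rfl)]
          simp [pvCore, hc, PySem.Int.mod, Int.fmod_eq_emod, hp]
        · have hd : i % 2 = 0 := by omega
          rw [show pvStepA (ret, 1) (i, c) = (ret, 1) by
                simp [pvStepA, hc, PySem.Int.mod, Int.fmod_eq_emod, hd]]
          rw [ih (i + 1) ret 1 (Or.inr rfl)]
          simp [pvCore, hc, PySem.Int.mod, Int.fmod_eq_emod, hd]

lemma pvSplit_ne_nil (cs : List Char) : pvSplit cs ≠ [] := by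
  cases cs with
  | nil => simp [pvSplit]
  | cons c rest =>
    simp only [pvSplit]
    split
    · simp
    · rcases h : pvSplit rest with _ | ⟨a, t⟩
      · exact absurd h (pvSplit_ne_nil rest)
      · simp [List.modifyHead]

-- splitOn's fuelled worker, specialised to the separator "1"
lemma go_one (fuel : Nat) : ∀ (l cur : List Char) (acc : List (List Char)),
    l.length < fuel →
    PySem.Chars.splitOn.go ['1'] fuel l cur acc =
      acc.reverse ++ (pvSplit l).modifyHead (cur.reverse ++ ·) := by
  induction fuel with
  | zero => intro l cur acc h; omega
  | succ n ih =>
    intro l cur acc h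
    cases l with
    | nil => simp [PySem.Chars.splitOn.go, pvSplit]
    | cons c rest =>
      by_cases hc : c = '1'
      · subst hc
        rw [show PySem.Chars.splitOn.go ['1'] (n+1) ('1' :: rest) cur acc =
              PySem.Chars.splitOn.go ['1'] n rest [] (cur.reverse :: acc) by
            simp [PySem.Chars.splitOn.go, List.isPrefixOf]]
        rw [ih rest [] (cur.reverse :: acc) (by simpa using h)]
        rcases hs : pvSplit rest with _ | ⟨a, t⟩
        · exact absurd hs (pvSplit_ne_nil rest)
        · simp [pvSplit, hs, List.modifyHead]
      · rw [show PySem.Chars.splitOn.go ['1'] (n+1) (c :: rest) cur acc =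
              PySem.Chars.splitOn.go ['1'] n rest (c :: cur) acc by
            simp [PySem.Chars.splitOn.go, List.isPrefixOf, Ne.symm hc]]
        rw [ih rest (c :: cur) acc (by simp at h ⊢; omega)]
        rcases hs : pvSplit rest with _ | ⟨a, t⟩
        · exact absurd hs (pvSplit_ne_nil rest)
        · simp [pvSplit, hc, hs, List.modifyHead]

lemma splitOn_one (cs : List Char) : PySem.Chars.splitOn cs ['1'] = pvSplit cs := by
  have h := go_one (cs.length + 1) cs [] [] (by omega)
  rcases hs : pvSplit cs with _ | ⟨a, t⟩
  · exact absurd hs (pvSplit_ne_nil cs)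
  · simpa [PySem.Chars.splitOn, hs, List.modifyHead] using h

-- xs[s::2] for s ∈ {0,1}: first the index-list form, then slice?
lemma evOdd_eq_range {α : Type} (xs : List α) :
    List.filterMap (fun (k : Nat) => xs[(2 * (k : Int)).toNat]?) (List.range ((xs.length + 1) / 2)) =
      pvEvOdd xs := by
  match xs with
  | [] => simp [pvEvOdd]
  | [a] => simp [pvEvOdd, List.range_succ]
  | a :: b :: rest =>
    have hlen : ((a :: b :: rest).length + 1) / 2 = (rest.length + 1) / 2 + 1 := by
      simp; omega
    rw [hlen, List.range_succ_eq_map, List.filterMap_cons, List.filterMap_map]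
    have hfun : ∀ k ∈ List.range ((rest.length + 1) / 2),
        ((fun (k : Nat) => (a :: b :: rest)[(2 * (k : Int)).toNat]?) ∘ Nat.succ) k =
        (fun (k : Nat) => rest[(2 * (k : Int)).toNat]?) k := by
      intro k _
      have h2 : (2 * ((k : Int) + 1)).toNat = 2 * k + 1 + 1 := by omega
      have h3 : (2 * (k : Int)).toNat = 2 * k := by omega
      simp [Function.comp, h2, h3]
    rw [List.filterMap_congr hfun, evOdd_eq_range rest]
    simp [pvEvOdd]

lemma slice_two (xs : List Char) (s : Int) (hs : s = 0 ∨ s = 1) :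
    PySem.List.slice? xs (some s) none 2 = some (pvEvOdd (xs.drop s.toNat)) := by
  rcases hs with hs | hs <;> subst hs
  · have h1 : PySem.List.slice? xs (some 0) none 2 =
        some (List.filterMap (fun (k : Nat) => xs[((0 : Int) + 2 * (k : Int)).toNat]?)
          (List.range (if (0:Int) < (xs.length : Int) then (((xs.length : Int) - 0 + 2 - 1) / 2).toNat else 0))) := by
      simp [PySem.List.slice?, PySem.List.sliceIndices]
    rw [h1]
    have hc : (if (0:Int) < (xs.length : Int) then (((xs.length : Int) - 0 + 2 - 1) / 2).toNat else 0) =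
        (xs.length + 1) / 2 := by split <;> omega
    rw [hc, List.filterMap_congr (fun (k : Nat) _ => by
      simp : ∀ k ∈ List.range ((xs.length+1)/2), _ = (fun (k:Nat) => xs[(2*(k:Int)).toNat]?) k)]
    rw [evOdd_eq_range xs]
    simp
  · cases xs with
    | nil => simp [PySem.List.slice?, PySem.List.sliceIndices, pvEvOdd]
    | cons a rest =>
      have h1 : PySem.List.slice? (a :: rest) (some 1) none 2 =
          some (List.filterMap (fun (k : Nat) => (a :: rest)[((1 : Int) + 2 * (k : Int)).toNat]?)
            (List.range (if (1:Int) < ((a::rest).length : Int) then ((((a::rest).length : Int) - 1 + 2 - 1) / 2).toNat else 0))) := by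
        simp [PySem.List.slice?, PySem.List.sliceIndices]
      rw [h1]
      have hc : (if (1:Int) < ((a::rest).length : Int) then ((((a::rest).length : Int) - 1 + 2 - 1) / 2).toNat else 0) =
          (rest.length + 1) / 2 := by simp; split <;> omega
      rw [hc, List.filterMap_congr (fun (k : Nat) _ => by
        have h2 : ((1:Int) + 2 * (k : Int)).toNat = (2 * (k : Int)).toNat + 1 := by omega
        simp [h2] : ∀ k ∈ List.range ((rest.length+1)/2), _ = (fun (k:Nat) => rest[(2*(k:Int)).toNat]?) k)]
      rw [evOdd_eq_range rest]
      simp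

lemma join_nil_flatten (parts : List (List Char)) :
    PySem.Chars.join [] parts = parts.flatten := by
  match parts with
  | [] => simp [PySem.Chars.join_nil]
  | [p] => simp [PySem.Chars.join_singleton]
  | p :: q :: rest =>
    rw [PySem.Chars.join_cons_cons, join_nil_flatten (q :: rest)]
    simp

-- B's fold over the enumerated segments flattens to pvSegs
lemma b_fold (segs : List (List Char)) : ∀ (out : List (List Char)) (k pos : Int),
    ((PySem.List.enumerate segs k).foldl pvStepB (out, pos)).1.flatten =
      out.flatten ++ pvSegs segs k pos := by
  induction segs with
  | nil => intro out k pos; simp [PySem.List.enumerate_nil, pvSegs]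
  | cons seg rest ih =>
    intro out k pos
    rw [PySem.List.enumerate_cons, List.foldl_cons]
    have hm : PySem.Int.mod (k + pos) 2 = 0 ∨ PySem.Int.mod (k + pos) 2 = 1 := by
      simp only [pymod2]; omega
    rw [show pvStepB (out, pos) (k, seg) =
          (out ++ [pvEvOdd (seg.drop (PySem.Int.mod (k + pos) 2).toNat)],
           pos + (seg.length : Int) + 1) by
        simp only [pvStepB]; rw [slice_two seg _ hm]; rfl]
    rw [ih (out ++ [pvEvOdd (seg.drop (PySem.Int.mod (k + pos) 2).toNat)]) (k + 1)
          (pos + (seg.length : Int) + 1)]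
    simp [pvSegs]

-- A's kept characters, segment by segment over the split
lemma core_segs (cs : List Char) : ∀ (k pos : Int), 0 ≤ k → 0 ≤ pos →
    pvCore cs pos (PySem.Int.mod k 2) = pvSegs (pvSplit cs) k pos := by
  induction cs with
  | nil =>
    intro k pos hk hp
    simp [pvCore, pvSplit, pvSegs, pvEvOdd]
  | cons c rest ih =>
    intro k pos hk hp
    by_cases hc : c = '1'
    · subst hc
      rw [show pvCore ('1' :: rest) pos (PySem.Int.mod k 2) =
            pvCore rest (pos + 1) (1 - PySem.Int.mod k 2) by simp [pvCore]]
      have hmod : 1 - PySem.Int.mod k 2 = PySem.Int.mod (k + 1) 2 := by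
        simp only [pymod2]; omega
      rw [hmod, ih (k + 1) (pos + 1) (by omega) (by omega)]
      rw [show pvSplit ('1' :: rest) = [] :: pvSplit rest by simp [pvSplit]]
      simp [pvSegs, pvEvOdd]
    · rcases hs : pvSplit rest with _ | ⟨h, t⟩
      · exact absurd hs (pvSplit_ne_nil rest)
      · have hrec := ih k (pos + 1) hk (by omega)
        rw [hs] at hrec
        have hoff : pos + 1 + (h.length : Int) + 1 = pos + (((c :: h).length : Int)) + 1 := by
          simp; omega
        by_cases hpar : (k + pos) % 2 = 0
        · -- phase 0: the current char is kept
          have hm0 : PySem.Int.mod (k + pos) 2 = 0 := by simp only [pymod2]; omega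
          have hm1 : PySem.Int.mod (k + (pos + 1)) 2 = 1 := by simp only [pymod2]; omega
          have hkeep : pos % 2 = k % 2 := by omega
          simp only [pvSegs] at hrec
          rw [hm1, show ((1 : Int)).toNat = 1 from rfl, hoff] at hrec
          rw [show pvCore (c :: rest) pos (PySem.Int.mod k 2) =
                c :: pvCore rest (pos + 1) (PySem.Int.mod k 2) by
              simp [pvCore, hc, hkeep]]
          rw [show pvSplit (c :: rest) = (c :: h) :: t by
              simp [pvSplit, hc, hs, List.modifyHead]]
          simp only [pvSegs, hm0, Int.toNat_zero, List.drop_zero]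
          rw [pvEvOdd_cons, hrec]
          simp
        · -- phase 1: the current char is skipped
          have hm1 : PySem.Int.mod (k + pos) 2 = 1 := by simp only [pymod2]; omega
          have hm0 : PySem.Int.mod (k + (pos + 1)) 2 = 0 := by simp only [pymod2]; omega
          have hskip : ¬ pos % 2 = k % 2 := by omega
          simp only [pvSegs] at hrec
          rw [hm0, Int.toNat_zero, List.drop_zero, hoff] at hrec
          rw [show pvCore (c :: rest) pos (PySem.Int.mod k 2) =
                pvCore rest (pos + 1) (PySem.Int.mod k 2) by
              simp [pvCore, hc, hskip]]
          rw [show pvSplit (c :: rest) = (c :: h) :: t by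
              simp [pvSplit, hc, hs, List.modifyHead]]
          simp only [pvSegs, hm1]
          rw [show ((1 : Int)).toNat = 1 from rfl, show (c :: h).drop 1 = h from rfl]
          exact hrec

-- ===== VERDICT (by name: the statement is the Claim_ definition above) =====
theorem solution_spec : Claim_equal_solution := by
  intro code _
  show solution code = solution_alt code
  unfold solution solution_alt
  dsimp only
  rw [a_fold code.toList 0 [] 0 (Or.inl rfl), List.nil_append,
      splitOn_one, join_nil_flatten,
      b_fold (pvSplit code.toList) [] 0 0, List.flatten_nil, List.nil_append,
      ← core_segs code.toList 0 0 le_rfl le_rfl,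
      show PySem.Int.mod 0 2 = 0 from rfl]
  rcases pvCore code.toList 0 0 with _ | _ <;> simp [String.ofList]
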